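-- pv_equiv track=rewrite | github.com/DustinYates/cheatah | app/domain/services/sms_burst_detector.py | _detect_identical_content
-- ===== SOURCE A (Python) =====
-- def _detect_identical_content(hashes: list[str]) -> tuple[bool, int]:
--     """Check for repeated content hashes. Returns (has_identical, max_repeat_count)."""
--     if not hashes:
--         return False, 0
--     counts: dict[str, int] = {}
--     for h in hashes:
--         counts[h] = counts.get(h, 0) + 1
--     max_count = max(counts.values())
--     return max_count >= 2, max_count
-- ===== SOURCE B (Python) =====
-- def _detect_identical_content(hashes: list[str]) -> tuple[bool, int]:
--     """Check for repeated content hashes. Returns (has_identical, max_repeat_count)."""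
--     if not hashes:
--         return False, 0
--     best = 0
--     rest = hashes
--     while rest:
--         h = rest[0]
--         best = max(best, rest.count(h))
--         rest = [x for x in rest if x != h]
--     return best >= 2, best
-- ===== Notes on version B (the rewrite author's own statement) =====
-- stated objective: alternative
-- what changed: Replaces the hash-frequency dictionary pass plus max() over its values by a shrink-the-list loop: repeatedly take the first remaining hash, count its occurrences with list.count, filter all its copies out, and keep the running maximum count.
import Mathlib
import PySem

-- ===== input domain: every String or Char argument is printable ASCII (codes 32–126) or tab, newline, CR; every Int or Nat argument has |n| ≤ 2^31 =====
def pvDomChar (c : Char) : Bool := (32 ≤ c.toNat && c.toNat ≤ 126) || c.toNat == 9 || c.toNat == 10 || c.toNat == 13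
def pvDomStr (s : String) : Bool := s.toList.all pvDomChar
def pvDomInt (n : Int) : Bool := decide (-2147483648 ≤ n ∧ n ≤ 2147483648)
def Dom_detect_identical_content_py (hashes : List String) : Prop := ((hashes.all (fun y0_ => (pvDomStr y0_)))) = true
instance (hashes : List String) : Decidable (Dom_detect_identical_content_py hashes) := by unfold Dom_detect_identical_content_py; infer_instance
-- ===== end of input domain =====

-- B replaces A's hash-frequency dictionary + max() over its values by a shrink-the-list loop
-- (count the first remaining hash, filter out its copies, keep the running maximum): an
-- alternative decomposition of the same task, not claimed faster.


-- ===== PORT A =====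
-- literal port of A: build the counts dict with counts[h] = counts.get(h, 0) + 1, then max(counts.values())
def detect_identical_content_py (hashes : List String) : Bool × Int :=
  if hashes = [] then (false, 0)
  else
    let counts : PySem.Dict String Int :=
      hashes.foldl (fun d h => d.insert h (d.getD h 0 + 1)) PySem.Dict.empty
    match PySem.List.max? counts.values (fun v => v) with
    | some max_count => (decide (max_count ≥ 2), max_count)
    | none => (false, 0)   -- unreachable: hashes ≠ [] so the dict is nonempty

-- ===== PORT B =====
-- literal port of B's while-loop: state (rest, best); each turn counts rest[0] and filters it out
def detect_identical_content_py_altLoop (rest : List String) (best : Int) : Int :=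
  match rest with
  | [] => best
  | h :: t =>
      detect_identical_content_py_altLoop
        ((h :: t).filter (fun x => !(x == h)))
        (max best ((PySem.List.count (h :: t) h : Nat) : Int))
termination_by rest.length
decreasing_by
  simp only [List.filter_cons, beq_self_eq_true, Bool.not_true, Bool.false_eq_true,
    if_false, List.length_cons]
  have := List.length_filter_le (fun x => !(x == h)) t
  omega

def detect_identical_content_py_alt (hashes : List String) : Bool × Int :=
  if hashes = [] then (false, 0)
  else
    let best := detect_identical_content_py_altLoop hashes 0
    (decide (best ≥ 2), best)

-- ===== PRECONDITION & SPEC =====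
def Spec_detect_identical_content_py (hashes : List String) (out : Bool × Int) : Prop := out = detect_identical_content_py_alt hashes
instance (hashes : List String) (out : Bool × Int) : Decidable (Spec_detect_identical_content_py hashes out) := by unfold Spec_detect_identical_content_py; infer_instance

-- ===== CLAIM (what is proved, stated in full; the proofs are below) =====
def Claim_equal_detect_identical_content_py : Prop := ∀ (hashes : List String), Dom_detect_identical_content_py hashes → Spec_detect_identical_content_py hashes (detect_identical_content_py hashes)

-- ===== LEMMAS AND PROOFS =====

-- the distinct elements of a filtered list are the filtered distinct elements
lemma pv_ofList_filter (p : String → Bool) (t : List String) :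
    PySem.Set.ofList (t.filter p) = (PySem.Set.ofList t).filter p := by
  induction t with
  | nil => rfl
  | cons a t ih =>
    by_cases hp : p a
    · simp only [List.filter_cons, hp, if_true, PySem.Set.ofList_cons, PySem.Set.discard, ih,
        List.filter_filter]
      congr 1
      apply List.filter_congr
      intro x hx
      simp [Bool.and_comm]
    · simp only [List.filter_cons, hp, Bool.false_eq_true, if_false, PySem.Set.ofList_cons,
        PySem.Set.discard, ih, List.filter_filter]
      apply (List.filter_congr ?_).symm
      intro x hx
      by_cases hxa : x = a
      · subst hxa; simp [hp]
      · simp [hxa]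

-- B's loop computes the running max of the counts of the distinct elements (in first-occurrence order)
lemma pv_altLoop_spec (n : Nat) : ∀ (xs : List String), xs.length ≤ n → ∀ (best : Int),
    detect_identical_content_py_altLoop xs best
      = ((PySem.Set.ofList xs).map (fun k => ((List.count k xs : Nat) : Int))).foldl max best := by
  induction n with
  | zero =>
    intro xs hx best
    have : xs = [] := List.eq_nil_of_length_eq_zero (Nat.le_zero.mp hx)
    subst this
    simp [detect_identical_content_py_altLoop]
  | succ n ih =>
    intro xs hx best
    match xs with
    | [] => simp [detect_identical_content_py_altLoop]
    | h :: t =>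
      rw [detect_identical_content_py_altLoop]
      have hlen : ((h :: t).filter (fun x => !(x == h))).length ≤ n := by
        simp only [List.filter_cons, beq_self_eq_true, Bool.not_true, Bool.false_eq_true, if_false]
        have := List.length_filter_le (fun x => !(x == h)) t
        simp only [List.length_cons] at hx
        omega
      rw [ih _ hlen]
      rw [PySem.Set.ofList_cons, List.map_cons, List.foldl_cons]
      congr 1
      · -- the lists folded over agree: for k ≠ h, count is unchanged by filtering h out
        simp only [List.filter_cons, beq_self_eq_true, Bool.not_true, Bool.false_eq_true, if_false]
        rw [pv_ofList_filter]
        show ((PySem.Set.ofList t).filter _).map _ = ((PySem.Set.ofList t).discard h).map _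
        rw [PySem.Set.discard]
        apply List.map_congr_left
        intro k hk
        have hkh : ¬ (k = h) := by
          have := List.of_mem_filter hk
          simpa using this
        congr 1
        rw [List.count_filter (by simpa using hkh)]
        simp [Ne.symm hkh]

-- the two ports agree on every input
lemma pv_main (hashes : List String) :
    detect_identical_content_py hashes = detect_identical_content_py_alt hashes := by
  match hashes with
  | [] => rfl
  | h :: t =>
    unfold detect_identical_content_py detect_identical_content_py_alt
    simp only [if_false, reduceCtorEq]
    have hcounter : (h :: t).foldl (fun d x => d.insert x (d.getD x 0 + 1)) PySem.Dict.empty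
        = PySem.Dict.counter (h :: t) :=
      PySem.Dict.foldl_insert_getD_add_one_eq_counter (h :: t)
    rw [hcounter]
    have hvals : (PySem.Dict.counter (h :: t)).values
        = (PySem.Set.ofList (h :: t)).map (fun k => ((List.count k (h :: t) : Nat) : Int)) := by
      show ((PySem.Dict.counter (h :: t)).items).map Prod.snd = _
      rw [PySem.Dict.items_counter]
      simp [List.map_map, Function.comp]
    rw [hvals, PySem.Set.ofList_cons, List.map_cons, PySem.List.max?_id_cons]
    rw [pv_altLoop_spec (h :: t).length (h :: t) le_rfl 0]
    rw [PySem.Set.ofList_cons, List.map_cons, List.foldl_cons]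
    have hpos : (0 : Int) ≤ ((List.count h (h :: t) : Nat) : Int) := by positivity
    rw [max_eq_right hpos]

-- ===== VERDICT (by name: the statement is the Claim_ definition above) =====
theorem detect_identical_content_py_spec : Claim_equal_detect_identical_content_py := by
  intro hashes _
  unfold Spec_detect_identical_content_py
  exact pv_main hashes
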